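-- pv_equiv track=rewrite | github.com/aRedCloth/heuristic | LabelFunction/LF_helper.py | get_label_for_form
-- ===== SOURCE A (Python) =====
-- from collections import Counter
--
-- def match_label_for_form_with_rules(label_form, rules):#["negation","positive"]->"positive"
--
--     transformed_labels = []  # 存储转换后的标签
--     i = 0  # 从 label_form 的起始位置开始
--
--     while i < len(label_form):
--         best_match = None  # 当前找到的最长匹配模式
--         best_sentiment_label = None  # 当前找到的匹配类别
--         best_length = 0  # 当前找到的最长匹配长度
--
--         # 遍历规则，寻找最长匹配
--         for sentiment_label, forms in rules.items():
--             for form in forms: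
--                 # 检查当前位置的子列表是否与规则匹配
--                 if label_form[i:i + len(form)] == form:
--                     # 更新最佳匹配
--                     if len(form) > best_length:
--                         best_match = form
--                         best_sentiment_label = sentiment_label
--                         best_length = len(form)
--
--         # 如果找到匹配规则
--         if best_match:
--             transformed_labels.append(best_sentiment_label)  # 替换为匹配的类别
--             i += best_length  # 跳过匹配的部分
--         else:
--             # 未找到匹配规则，保留当前标签
--             transformed_labels.append(label_form[i])
--             i += 1  # 继续下一个标签
--
--     return transformed_labels
--
-- def get_label_for_form(label_form, rules, sentiment_labels=["positive", "negative","neutral"]):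
--     matched_form=match_label_for_form_with_rules(label_form,rules)
--     # 初始化计数器
--     label_count = Counter()
--
--     # 遍历 label_form 并统计 sentiment_label 的出现次数
--     for label in matched_form:
--         if label in sentiment_labels:
--             label_count[label] += 1
--
--     # 获取最多的标签及其出现次数
--     del label_count["neutral"]
--     most_common = label_count.most_common()
--
--     # 如果没有统计到 sentiment_label，返回 "neutral"
--     if not most_common:
--         return "neutral"
--
--     max_frequency = most_common[0][1]  # 最大频率
--     max_labels = [label for label, freq in most_common if freq == max_frequency]
--
--     # 判断结果
--     if len(max_labels) == 1:#有唯一最多的sentiment_label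
--         return max_labels[0]  # 返回该标签
--     else:#有多个最多的标签
--         return "neutral"  # 返回 "neutral" 表示
-- ===== SOURCE B (Python) =====
-- def get_label_for_form(label_form, rules, sentiment_labels=["positive", "negative", "neutral"]):
--     # Flatten the rules once (empty forms can never match) and order them
--     # longest-first with a stable sort, so the first matching entry at each
--     # position is exactly the greedy longest match with insertion-order ties.
--     pairs = [(form, s) for s, forms in rules.items() for form in forms if form]
--     pairs.sort(key=lambda p: len(p[0]), reverse=True)
--     counts = {}
--     i, n = 0, len(label_form)
--     while i < n:
--         label, step = label_form[i], 1
--         for form, s in pairs: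
--             if label_form[i:i + len(form)] == form:
--                 label, step = s, len(form)
--                 break
--         if label != "neutral" and label in sentiment_labels:
--             counts[label] = counts.get(label, 0) + 1
--         i += step
--     if not counts:
--         return "neutral"
--     best = max(counts.values())
--     winners = [l for l, c in counts.items() if c == best]
--     return winners[0] if len(winners) == 1 else "neutral"
-- ===== Notes on version B (the rewrite author's own statement) =====
-- stated objective: alternative
-- what changed: Instead of scanning every rule at every position to track the strictly-longest match and then building the transformed list, a Counter and most_common(), B flattens the rules once, stably sorts them by descending form length so the first match at each position is the greedy longest match with insertion-order tie-break, and counts non-neutral sentiment labels inline in a dict, finishing with max over the counts.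
import Mathlib
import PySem

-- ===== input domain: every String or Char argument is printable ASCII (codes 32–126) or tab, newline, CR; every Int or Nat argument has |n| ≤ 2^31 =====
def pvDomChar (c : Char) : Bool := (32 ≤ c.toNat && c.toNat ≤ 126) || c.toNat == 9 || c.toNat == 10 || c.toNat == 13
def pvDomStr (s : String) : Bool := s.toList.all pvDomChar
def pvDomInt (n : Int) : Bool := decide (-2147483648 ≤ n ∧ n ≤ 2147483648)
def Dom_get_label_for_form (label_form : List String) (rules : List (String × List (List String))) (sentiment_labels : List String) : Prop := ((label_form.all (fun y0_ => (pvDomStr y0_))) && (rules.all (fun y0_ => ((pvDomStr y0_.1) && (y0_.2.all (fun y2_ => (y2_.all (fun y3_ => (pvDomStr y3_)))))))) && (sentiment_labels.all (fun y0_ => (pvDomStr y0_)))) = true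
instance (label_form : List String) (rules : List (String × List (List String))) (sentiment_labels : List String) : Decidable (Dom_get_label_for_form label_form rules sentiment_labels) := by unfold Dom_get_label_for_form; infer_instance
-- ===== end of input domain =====

-- B replaces A's per-position scan over all rules (track the strictly longest match)
-- by a one-time stable length-descending sort of the flattened rules followed by a
-- first-match scan, and counts sentiment labels inline in a dict instead of building
-- the transformed list, a Counter, and most_common; objective: alternative algorithm.

-- ===== PORT A =====
-- Python truthiness of `if best_match:` (best_match is None or a list)
def pvTruthy : Option (List String) → Bool
  | none => false
  | some f => !f.isEmpty

-- the inner `for sentiment_label, forms in rules.items(): for form in forms: …` scan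
def pvBestA (label_form : List String) (rules : List (String × List (List String))) (i : Nat) :
    Option (List String) × Option String × Nat :=
  rules.foldl (fun acc r =>
    r.2.foldl (fun acc form =>
      if PySem.List.slice label_form (some (i : Int)) (some ((i : Int) + (form.length : Int))) = form then
        (if form.length > acc.2.2 then (some form, some r.1, form.length) else acc)
      else acc) acc) (none, none, 0)

-- the `while i < len(label_form)` loop of match_label_for_form_with_rules
-- (fuel: the loop runs at most len(label_form) iterations, i grows by ≥ 1 each time)
def pvLoopA (label_form : List String) (rules : List (String × List (List String))) :
    Nat → Nat → List String → List String
  | 0, _, acc => acc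
  | fuel + 1, i, acc =>
    if i < label_form.length then
      let b := pvBestA label_form rules i
      if pvTruthy b.1 then
        pvLoopA label_form rules fuel (i + b.2.2) (acc ++ [b.2.1.getD ""])
      else
        pvLoopA label_form rules fuel (i + 1) (acc ++ [(PySem.List.pyGet? label_form (i : Int)).getD ""])
    else acc

def get_label_for_form (label_form : List String) (rules : List (String × List (List String))) (sentiment_labels : List String) : String :=
  let matched := pvLoopA label_form rules label_form.length 0 []
  let label_count :=
    matched.foldl (fun d label =>
      if sentiment_labels.contains label then d.modify label 0 (· + 1) else d)
      (PySem.Dict.empty : PySem.Dict String Int)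
  let label_count := label_count.erase "neutral"
  -- Counter.most_common() = sorted(items, key=itemgetter(1), reverse=True)
  let most_common := PySem.List.sorted label_count.items (fun p => p.2) true
  if most_common.isEmpty then "neutral"
  else
    let max_frequency := (most_common.headD ("", 0)).2
    let max_labels := (most_common.filter (fun p => p.2 == max_frequency)).map (fun p => p.1)
    if max_labels.length = 1 then max_labels.headD "neutral" else "neutral"

-- ===== PORT B =====
-- the `for form, s in pairs: … break` first-match scan
def pvMatchAt (label_form : List String) (pairs : List (List String × String)) (i : Nat) :
    Option (List String × String) :=
  pairs.find? (fun p => decide (PySem.List.slice label_form (some (i : Int)) (some ((i : Int) + (p.1.length : Int))) = p.1))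

-- the `while i < n` loop of B, counting inline
def pvLoopB (label_form : List String) (pairs : List (List String × String)) (sentiment_labels : List String) :
    Nat → Nat → PySem.Dict String Int → PySem.Dict String Int
  | 0, _, d => d
  | fuel + 1, i, d =>
    if i < label_form.length then
      let ls : String × Nat :=
        match pvMatchAt label_form pairs i with
        | some p => (p.2, p.1.length)
        | none => ((PySem.List.pyGet? label_form (i : Int)).getD "", 1)
      let d' := if ls.1 ≠ "neutral" ∧ sentiment_labels.contains ls.1
                then d.insert ls.1 (d.getD ls.1 0 + 1) else d
      pvLoopB label_form pairs sentiment_labels fuel (i + ls.2) d'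
    else d

def get_label_for_form_alt (label_form : List String) (rules : List (String × List (List String))) (sentiment_labels : List String) : String :=
  let pairs := rules.flatMap (fun r => (r.2.filter (fun f => !f.isEmpty)).map (fun f => (f, r.1)))
  let spairs := PySem.List.sorted pairs (fun p => p.1.length) true
  let counts := pvLoopB label_form spairs sentiment_labels label_form.length 0 PySem.Dict.empty
  if counts.items.isEmpty then "neutral"
  else
    let best := (PySem.List.max? counts.values (fun v => v)).getD 0
    let winners := (counts.items.filter (fun p => p.2 == best)).map (fun p => p.1)
    if winners.length = 1 then winners.headD "neutral" else "neutral"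

-- ===== PRECONDITION & SPEC =====
def Spec_get_label_for_form (label_form : List String) (rules : List (String × List (List String))) (sentiment_labels : List String) (out : String) : Prop := out = get_label_for_form_alt label_form rules sentiment_labels
instance (label_form : List String) (rules : List (String × List (List String))) (sentiment_labels : List String) (out : String) : Decidable (Spec_get_label_for_form label_form rules sentiment_labels out) := by unfold Spec_get_label_for_form; infer_instance

-- ===== CLAIM (what is proved, stated in full; the proofs are below) =====
def Claim_equal_get_label_for_form : Prop := ∀ (label_form : List String) (rules : List (String × List (List String))) (sentiment_labels : List String), Dom_get_label_for_form label_form rules sentiment_labels → Spec_get_label_for_form label_form rules sentiment_labels (get_label_for_form label_form rules sentiment_labels)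

-- ===== LEMMAS AND PROOFS =====

-- the match predicate at position i
def pvM (label_form : List String) (i : Nat) (p : List String × String) : Bool :=
  decide (PySem.List.slice label_form (some (i : Int)) (some ((i : Int) + (p.1.length : Int))) = p.1)

-- length of the best candidate so far
def pvLenO {α : Type} (key : α → Nat) : Option α → Nat
  | none => 0
  | some p => key p

-- A's strict-improvement step, abstractly
def pvGStep {α : Type} (key : α → Nat) (m : α → Bool) (b : Option α) (x : α) : Option α :=
  if m x = true ∧ key x > pvLenO key b then some x else b

-- A's (best_match, best_sentiment_label, best_length) triple from an Option pair
def pvAbsT : Option (List String × String) → Option (List String) × Option String × Nat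
  | none => (none, none, 0)
  | some p => (some p.1, some p.2, p.1.length)

def pvFlatP (rules : List (String × List (List String))) : List (List String × String) :=
  rules.flatMap (fun r => r.2.map (fun f => (f, r.1)))

def pvPairsB (rules : List (String × List (List String))) : List (List String × String) :=
  rules.flatMap (fun r => (r.2.filter (fun f => !f.isEmpty)).map (fun f => (f, r.1)))

-- A1: the nested rule scan is the flat strict-improvement fold
theorem pvBestA_eq_fold (label_form : List String) (rules : List (String × List (List String))) (i : Nat) :
    pvBestA label_form rules i
      = pvAbsT ((pvFlatP rules).foldl (pvGStep (fun p => p.1.length) (pvM label_form i)) none) := by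
  unfold pvBestA pvFlatP
  rw [List.foldl_flatMap]
  rw [show ((none, none, 0) : Option (List String) × Option String × Nat)
      = pvAbsT none from rfl]
  refine List.foldl_hom pvAbsT ?_
  intro b r
  rw [List.foldl_map]
  refine List.foldl_hom pvAbsT ?_
  intro b form
  have h22 : (pvAbsT b).2.2 = pvLenO (fun p : List String × String => p.1.length) b := by
    cases b <;> rfl
  by_cases hs : PySem.List.slice label_form (some (i : Int)) (some ((i : Int) + (form.length : Int))) = form
  · rw [if_pos hs]
    have hm : pvM label_form i (form, r.1) = true := by simp [pvM, hs]
    by_cases hl : form.length > pvLenO (fun p : List String × String => p.1.length) b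
    · rw [h22, if_pos hl]
      unfold pvGStep
      rw [if_pos ⟨hm, hl⟩]
      rfl
    · rw [h22, if_neg hl]
      unfold pvGStep
      rw [if_neg (fun hc => hl hc.2)]
  · rw [if_neg hs]
    have hm : pvM label_form i (form, r.1) = false := by simp [pvM, hs]
    unfold pvGStep
    rw [if_neg (fun hc => by simp [hm] at hc)]

-- A2: empty forms never improve the best
theorem pvFold_filter_empty (label_form : List String) (i : Nat) (l : List (List String × String)) (b : Option (List String × String)) :
    l.foldl (pvGStep (fun p => p.1.length) (pvM label_form i)) b
      = (l.filter (fun p => !p.1.isEmpty)).foldl (pvGStep (fun p => p.1.length) (pvM label_form i)) b := by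
  rw [List.foldl_filter]
  have hstep : (fun (b : Option (List String × String)) p =>
      if (!p.1.isEmpty) = true then pvGStep (fun p => p.1.length) (pvM label_form i) b p else b)
      = pvGStep (fun p => p.1.length) (pvM label_form i) := by
    funext b p
    by_cases hp : p.1.isEmpty
    · have hno : ¬ (pvM label_form i p = true ∧ (fun p => p.1.length) p > pvLenO (fun p => p.1.length) b) := by
        rintro ⟨-, hlen⟩
        rw [List.isEmpty_iff] at hp
        simp [hp] at hlen
      unfold pvGStep
      rw [if_neg hno, if_neg (by simp [hp])]
    · simp [hp]
  rw [hstep]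

theorem pvFlatP_filter (rules : List (String × List (List String))) :
    (pvFlatP rules).filter (fun p => !p.1.isEmpty) = pvPairsB rules := by
  unfold pvFlatP pvPairsB
  induction rules with
  | nil => rfl
  | cons r rs ih =>
    simp only [List.flatMap_cons, List.filter_append, ih]
    congr 1
    rw [List.filter_map]
    rfl

-- insertBy keeps a length-descending list length-descending
theorem pvPw_insertBy {α : Type} (key : α → Nat) (x : α) (acc : List α)
    (h : acc.Pairwise (fun a b => key b ≤ key a)) :
    (PySem.List.insertBy (fun a b => decide (key b < key a)) x acc).Pairwise (fun a b => key b ≤ key a) := by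
  induction acc with
  | nil => simp [PySem.List.insertBy]
  | cons y ys ih =>
    rw [List.pairwise_cons] at h
    simp only [PySem.List.insertBy]
    split_ifs with hb
    · simp only [decide_eq_true_eq] at hb
      refine List.Pairwise.cons ?_ (List.Pairwise.cons h.1 h.2)
      intro z hz
      rcases List.mem_cons.mp hz with rfl | hz
      · omega
      · have := h.1 z hz; omega
    · simp only [decide_eq_true_eq] at hb
      refine List.Pairwise.cons ?_ (ih h.2)
      intro z hz
      rcases (PySem.List.mem_insertBy _ _ _ _).mp hz with rfl | hz
      · omega
      · exact h.1 z hz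

-- first match after inserting into a length-descending list
theorem pvFind_insertBy {α : Type} (key : α → Nat) (m : α → Bool) (x : α) (acc : List α)
    (h : acc.Pairwise (fun a b => key b ≤ key a)) :
    (PySem.List.insertBy (fun a b => decide (key b < key a)) x acc).find? m
      = if m x then (match acc.find? m with
          | some y => if key y < key x then some x else some y
          | none => some x)
        else acc.find? m := by
  induction acc with
  | nil =>
    simp only [PySem.List.insertBy, List.find?_nil]
    by_cases hm : m x
    · rw [List.find?_cons_of_pos hm, if_pos hm]
    · rw [List.find?_cons_of_neg hm, if_neg hm]
      exact List.find?_nil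
  | cons y ys ih =>
    rw [List.pairwise_cons] at h
    by_cases hblt : key y < key x
    · rw [show PySem.List.insertBy (fun a b => decide (key b < key a)) x (y :: ys) = x :: y :: ys from by
        simp [PySem.List.insertBy, hblt]]
      by_cases hm : m x
      · rw [List.find?_cons_of_pos hm, if_pos hm]
        cases hfy : (y :: ys).find? m with
        | none => rfl
        | some z =>
          have hz : z ∈ y :: ys := List.mem_of_find?_eq_some hfy
          have hzy : key z ≤ key y := by
            rcases List.mem_cons.mp hz with rfl | hz
            · exact le_refl _
            · exact h.1 z hz
          simp only
          rw [if_pos (by omega)]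
      · rw [List.find?_cons_of_neg hm, if_neg hm]
    · rw [show PySem.List.insertBy (fun a b => decide (key b < key a)) x (y :: ys)
          = y :: PySem.List.insertBy (fun a b => decide (key b < key a)) x ys from by
        simp [PySem.List.insertBy, hblt]]
      by_cases hy : m y
      · rw [List.find?_cons_of_pos hy, List.find?_cons_of_pos hy]
        by_cases hm : m x
        · rw [if_pos hm]
          simp only
          rw [if_neg (by omega)]
        · rw [if_neg hm]
      · rw [List.find?_cons_of_neg hy, List.find?_cons_of_neg hy, ih h.2]

-- first match over the stable length-descending insertion = strict-improvement fold
theorem pvFind_foldl_insertBy {α : Type} (key : α → Nat) (m : α → Bool) :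
    ∀ (xs acc : List α), acc.Pairwise (fun a b => key b ≤ key a) → (∀ p ∈ xs, 1 ≤ key p) →
      ((xs.foldl (fun a x => PySem.List.insertBy (fun a b => decide (key b < key a)) x a) acc).find? m)
        = xs.foldl (pvGStep key m) (acc.find? m) := by
  intro xs
  induction xs with
  | nil => intro acc _ _; simp
  | cons x xs ih =>
    intro acc hpw hk
    simp only [List.foldl_cons]
    rw [ih _ (pvPw_insertBy key x acc hpw) (fun p hp => hk p (List.mem_cons_of_mem _ hp))]
    congr 1
    rw [pvFind_insertBy key m x acc hpw]
    have hx1 : 1 ≤ key x := hk x List.mem_cons_self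
    unfold pvGStep
    by_cases hm : m x
    · rw [if_pos hm]
      cases hfy : acc.find? m with
      | none =>
        rw [show pvLenO key (none : Option α) = 0 from rfl]
        show some x = if m x = true ∧ key x > 0 then some x else none
        rw [if_pos ⟨hm, by omega⟩]
      | some z =>
        rw [show pvLenO key (some z) = key z from rfl]
        show (if key z < key x then some x else some z) = if m x = true ∧ key x > key z then some x else some z
        by_cases hlt : key z < key x
        · rw [if_pos hlt, if_pos ⟨hm, hlt⟩]
        · rw [if_neg hlt, if_neg (fun hc => hlt hc.2)]
    · simp [hm]

-- the per-position correspondence between A's triple and B's sorted first match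
theorem pvBestA_eq_find (label_form : List String) (rules : List (String × List (List String))) (i : Nat) :
    pvBestA label_form rules i
      = pvAbsT ((PySem.List.sorted (pvPairsB rules) (fun p => p.1.length) true).find? (pvM label_form i)) := by
  rw [pvBestA_eq_fold, pvFold_filter_empty, pvFlatP_filter]
  congr 1
  rw [PySem.List.sorted_rev_eq_foldl_insertBy,
    pvFind_foldl_insertBy (fun p => p.1.length) (pvM label_form i) (pvPairsB rules) []
      (by simp) ?_]
  · rw [List.find?_nil]
  · intro p hp
    simp only [pvPairsB, List.mem_flatMap, List.mem_map, List.mem_filter] at hp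
    obtain ⟨r, -, f, ⟨-, hf⟩, rfl⟩ := hp
    have : f ≠ [] := by simpa [List.isEmpty_iff] using hf
    have := List.length_pos_iff.mpr this
    simpa using this

-- A's loop with an accumulator
theorem pvLoopA_acc (label_form : List String) (rules : List (String × List (List String))) :
    ∀ (fuel i : Nat) (acc : List String),
      pvLoopA label_form rules fuel i acc = acc ++ pvLoopA label_form rules fuel i [] := by
  intro fuel
  induction fuel with
  | zero => intro i acc; simp [pvLoopA]
  | succ fuel ih =>
    intro i acc
    simp only [pvLoopA]
    by_cases hi : i < label_form.length
    · rw [if_pos hi, if_pos hi]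
      by_cases ht : pvTruthy (pvBestA label_form rules i).1
      · rw [if_pos ht, if_pos ht, ih _ (acc ++ _), ih _ ([] ++ _), List.nil_append, List.append_assoc]
      · rw [if_neg ht, if_neg ht, ih _ (acc ++ _), ih _ ([] ++ _), List.nil_append, List.append_assoc]
    · rw [if_neg hi, if_neg hi, List.append_nil]

-- the loop correspondence: B's dict loop = counting A's filtered transformed labels
theorem pvLoopB_eq (label_form : List String) (rules : List (String × List (List String))) (sentiment_labels : List String) :
    ∀ (fuel i : Nat) (d : PySem.Dict String Int),
      pvLoopB label_form (PySem.List.sorted (pvPairsB rules) (fun p => p.1.length) true) sentiment_labels fuel i d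
        = ((pvLoopA label_form rules fuel i []).filter
            (fun l => decide (l ≠ "neutral" ∧ sentiment_labels.contains l))).foldl
            (fun d l => d.insert l (d.getD l 0 + 1)) d := by
  intro fuel
  induction fuel with
  | zero => intro i d; simp [pvLoopB, pvLoopA]
  | succ fuel ih =>
    intro i d
    by_cases hi : i < label_form.length
    · cases hf : pvMatchAt label_form (PySem.List.sorted (pvPairsB rules) (fun p => p.1.length) true) i with
      | some p =>
        have hbest : pvBestA label_form rules i = (some p.1, some p.2, p.1.length) := by
          rw [pvBestA_eq_find, show (PySem.List.sorted (pvPairsB rules) (fun q => q.1.length) true).find? (pvM label_form i)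
              = pvMatchAt label_form (PySem.List.sorted (pvPairsB rules) (fun q => q.1.length) true) i from rfl,
            hf]
          rfl
        have hpmem : p ∈ pvPairsB rules := by
          exact (PySem.List.mem_sorted _ _ _ _).mp (List.mem_of_find?_eq_some hf)
        have hpne : p.1.isEmpty = false := by
          simp only [pvPairsB, List.mem_flatMap, List.mem_map, List.mem_filter] at hpmem
          obtain ⟨r, -, f, ⟨-, hfne⟩, rfl⟩ := hpmem
          simpa using hfne
        have hA : pvLoopA label_form rules (fuel + 1) i []
            = [p.2] ++ pvLoopA label_form rules fuel (i + p.1.length) [] := by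
          simp only [pvLoopA, if_pos hi, hbest, pvTruthy, hpne]
          rw [if_pos (by simp), pvLoopA_acc]
          rfl
        have hB : pvLoopB label_form (PySem.List.sorted (pvPairsB rules) (fun p => p.1.length) true) sentiment_labels (fuel + 1) i d
            = pvLoopB label_form (PySem.List.sorted (pvPairsB rules) (fun p => p.1.length) true) sentiment_labels fuel (i + p.1.length)
              (if p.2 ≠ "neutral" ∧ sentiment_labels.contains p.2 then d.insert p.2 (d.getD p.2 0 + 1) else d) := by
          simp only [pvLoopB, if_pos hi, hf]
        rw [hA, hB, ih, List.filter_append, List.foldl_append]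
        congr 1
        by_cases hc : p.2 ≠ "neutral" ∧ sentiment_labels.contains p.2
        · rw [if_pos hc, List.filter_cons_of_pos (by simpa using hc), List.filter_nil, List.foldl_cons, List.foldl_nil]
        · rw [if_neg hc, List.filter_cons_of_neg (by simpa using hc), List.filter_nil, List.foldl_nil]
      | none =>
        have hbest : pvBestA label_form rules i
            = ((none : Option (List String)), (none : Option String), 0) := by
          rw [pvBestA_eq_find, show (PySem.List.sorted (pvPairsB rules) (fun q => q.1.length) true).find? (pvM label_form i)
              = pvMatchAt label_form (PySem.List.sorted (pvPairsB rules) (fun q => q.1.length) true) i from rfl,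
            hf]
          rfl
        have hA : pvLoopA label_form rules (fuel + 1) i []
            = [(PySem.List.pyGet? label_form (i : Int)).getD ""] ++ pvLoopA label_form rules fuel (i + 1) [] := by
          simp only [pvLoopA, if_pos hi, hbest, pvTruthy]
          rw [if_neg (by simp), pvLoopA_acc]
          rfl
        have hB : pvLoopB label_form (PySem.List.sorted (pvPairsB rules) (fun p => p.1.length) true) sentiment_labels (fuel + 1) i d
            = pvLoopB label_form (PySem.List.sorted (pvPairsB rules) (fun p => p.1.length) true) sentiment_labels fuel (i + 1)
              (if (PySem.List.pyGet? label_form (i : Int)).getD "" ≠ "neutral" ∧ sentiment_labels.contains ((PySem.List.pyGet? label_form (i : Int)).getD "")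
               then d.insert ((PySem.List.pyGet? label_form (i : Int)).getD "") (d.getD ((PySem.List.pyGet? label_form (i : Int)).getD "") 0 + 1) else d) := by
          simp only [pvLoopB, if_pos hi, hf]
        rw [hA, hB, ih, List.filter_append, List.foldl_append]
        congr 1
        by_cases hc : (PySem.List.pyGet? label_form (i : Int)).getD "" ≠ "neutral" ∧ sentiment_labels.contains ((PySem.List.pyGet? label_form (i : Int)).getD "")
        · rw [if_pos hc, List.filter_cons_of_pos (by simpa using hc), List.filter_nil, List.foldl_cons, List.foldl_nil]
        · rw [if_neg hc, List.filter_cons_of_neg (by simpa using hc), List.filter_nil, List.foldl_nil]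
    · simp only [pvLoopB, pvLoopA, if_neg hi]
      rfl

-- set(filter) = filter(set): needed to push erase through Counter
theorem pvSet_ofList_filter (xs : List String) (q : String → Bool) :
    PySem.Set.ofList (xs.filter q) = (PySem.Set.ofList xs).filter q := by
  induction xs with
  | nil => rfl
  | cons x xsi ih =>
    by_cases hq : q x
    · rw [List.filter_cons_of_pos hq, PySem.Set.ofList_cons, PySem.Set.ofList_cons, ih,
        List.filter_cons_of_pos hq]
      unfold PySem.Set.discard
      rw [List.filter_filter, List.filter_filter]
      exact congrArg (x :: ·) (List.filter_congr fun y _ => Bool.and_comm _ _)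
    · rw [List.filter_cons_of_neg hq, PySem.Set.ofList_cons, ih, List.filter_cons_of_neg hq]
      unfold PySem.Set.discard
      rw [List.filter_filter]
      refine List.filter_congr fun y _ => ?_
      by_cases hyx : y = x
      · subst hyx; simp [hq]
      · simp [hyx]

-- deleting a key from a Counter = counting without that element
theorem pvCounter_erase (xs : List String) (k : String) :
    (PySem.Dict.counter xs).erase k = PySem.Dict.counter (xs.filter (fun x => !(x == k))) := by
  apply PySem.Dict.ext
  rw [show ((PySem.Dict.counter xs).erase k).items
      = (PySem.Dict.counter xs).items.filter (fun p => !(p.1 == k)) from rfl]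
  rw [PySem.Dict.items_counter, PySem.Dict.items_counter, List.filter_map,
    pvSet_ofList_filter]
  refine List.map_congr_left fun a ha => ?_
  rw [List.mem_filter] at ha
  have hpa : (!(a == k)) = true := by simpa using ha.2
  rw [List.count_filter (p := fun x => !(x == k)) (a := a) (l := xs) hpa]

-- A's counting pipeline equals B's dict
theorem pvDict_eq (label_form : List String) (rules : List (String × List (List String))) (sentiment_labels : List String) :
    ((pvLoopA label_form rules label_form.length 0 []).foldl (fun d label =>
        if sentiment_labels.contains label then d.modify label 0 (· + 1) else d)
        (PySem.Dict.empty : PySem.Dict String Int)).erase "neutral"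
      = pvLoopB label_form (PySem.List.sorted (pvPairsB rules) (fun p => p.1.length) true) sentiment_labels label_form.length 0 PySem.Dict.empty := by
  rw [pvLoopB_eq, PySem.Dict.foldl_insert_getD_add_one_eq_counter]
  rw [show ((pvLoopA label_form rules label_form.length 0 []).foldl (fun d label =>
        if sentiment_labels.contains label then d.modify label 0 (· + 1) else d)
        (PySem.Dict.empty : PySem.Dict String Int))
      = ((pvLoopA label_form rules label_form.length 0 []).filter (fun l => sentiment_labels.contains l)).foldl
          (fun d l => d.modify l 0 (· + 1)) PySem.Dict.empty from (List.foldl_filter).symm]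
  rw [show (((pvLoopA label_form rules label_form.length 0 []).filter (fun l => sentiment_labels.contains l)).foldl
          (fun d l => d.modify l 0 (· + 1)) PySem.Dict.empty)
      = PySem.Dict.counter ((pvLoopA label_form rules label_form.length 0 []).filter (fun l => sentiment_labels.contains l)) from rfl]
  rw [pvCounter_erase, List.filter_filter]
  refine congrArg PySem.Dict.counter (List.filter_congr fun l _ => ?_)
  by_cases h1 : l = "neutral"
  · subst h1; simp
  · simp [h1]

-- A's tail computation (from most_common on) and B's tail computation (from counts on)
def pvFinA (d : PySem.Dict String Int) : String :=
  let most_common := PySem.List.sorted d.items (fun p => p.2) true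
  if most_common.isEmpty then "neutral"
  else
    let max_frequency := (most_common.headD ("", 0)).2
    let max_labels := (most_common.filter (fun p => p.2 == max_frequency)).map (fun p => p.1)
    if max_labels.length = 1 then max_labels.headD "neutral" else "neutral"

def pvFinB (d : PySem.Dict String Int) : String :=
  if d.items.isEmpty then "neutral"
  else
    let best := (PySem.List.max? d.values (fun v => v)).getD 0
    let winners := (d.items.filter (fun p => p.2 == best)).map (fun p => p.1)
    if winners.length = 1 then winners.headD "neutral" else "neutral"

-- final extraction: most_common pipeline = max/winners pipeline, for any dict
theorem pvFinal_eq (d : PySem.Dict String Int) : pvFinA d = pvFinB d := by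
  simp only [pvFinA, pvFinB]
  by_cases hnil : d.items = []
  · simp [hnil, PySem.List.sorted_eq_nil_iff]
  · have hsn : PySem.List.sorted d.items (fun p => p.2) true ≠ [] := by
      simpa [PySem.List.sorted_eq_nil_iff] using hnil
    obtain ⟨h, t, hht⟩ := List.exists_cons_of_ne_nil hsn
    have hvne : d.values ≠ [] := by
      show d.items.map (fun p => p.2) ≠ []
      simpa using hnil
    obtain ⟨b, hb⟩ : ∃ b, PySem.List.max? d.values (fun v => v) = some b := by
      cases hmb : PySem.List.max? d.values (fun v => v) with
      | none => exact absurd ((PySem.List.max?_eq_none_iff _ _).mp hmb) hvne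
      | some b => exact ⟨b, rfl⟩
    have hmemh : h ∈ d.items := (PySem.List.mem_sorted _ _ _ _).mp (hht ▸ List.mem_cons_self)
    have hub : ∀ y ∈ d.items, y.2 ≤ h.2 := PySem.List.key_head_sorted_rev_ge d.items (fun p => p.2) hht
    have hbmem : b ∈ d.values := PySem.List.max?_mem hb
    have hbub : ∀ v ∈ d.values, v ≤ b := PySem.List.max?_isMax hb
    have hb2 : b = h.2 := by
      refine le_antisymm ?_ ?_
      · obtain ⟨p, hp, rfl⟩ := List.mem_map.mp hbmem
        exact hub p hp
      · exact hbub h.2 (List.mem_map_of_mem hmemh)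
    have hperm : ((PySem.List.sorted d.items (fun p => p.2) true).filter (fun p => p.2 == h.2)).Perm
        (d.items.filter (fun p => p.2 == h.2)) :=
      (PySem.List.sorted_perm d.items (fun p => p.2) true).filter _
    rw [hht] at hperm
    rw [hht, hb]
    simp only [List.isEmpty_cons, List.headD_cons, Option.getD_some, hb2]
    rw [show d.items.isEmpty = false from by simp [hnil]]
    simp only [Bool.false_eq_true, if_false]
    have hpm := hperm.map (fun p => p.1)
    have hlen := hpm.length_eq
    by_cases hl : ((( h :: t).filter (fun p => p.2 == h.2)).map (fun p => p.1)).length = 1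
    · have hl2 : ((d.items.filter (fun p => p.2 == h.2)).map (fun p => p.1)).length = 1 := by omega
      rw [if_pos hl, if_pos hl2]
      obtain ⟨a, ha⟩ := List.length_eq_one_iff.mp hl
      rw [ha] at hpm
      rw [ha, List.perm_singleton.mp hpm.symm]
    · have hl2 : ¬ ((d.items.filter (fun p => p.2 == h.2)).map (fun p => p.1)).length = 1 := by omega
      rw [if_neg hl, if_neg hl2]

-- ===== VERDICT (by name: the statement is the Claim_ definition above) =====
theorem get_label_for_form_spec : Claim_equal_get_label_for_form := by
  intro label_form rules sentiment_labels _hdom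
  show get_label_for_form label_form rules sentiment_labels
      = get_label_for_form_alt label_form rules sentiment_labels
  have hA : get_label_for_form label_form rules sentiment_labels
      = pvFinA (((pvLoopA label_form rules label_form.length 0 []).foldl (fun d label =>
          if sentiment_labels.contains label then d.modify label 0 (· + 1) else d)
          (PySem.Dict.empty : PySem.Dict String Int)).erase "neutral") := rfl
  have hB : get_label_for_form_alt label_form rules sentiment_labels
      = pvFinB (pvLoopB label_form (PySem.List.sorted (pvPairsB rules) (fun p => p.1.length) true)
          sentiment_labels label_form.length 0 PySem.Dict.empty) := rfl
  rw [hA, hB, pvDict_eq label_form rules sentiment_labels, pvFinal_eq]
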